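-- pv_equiv track=rewrite | github.com/dchiueh/quoteworthy | what-they-said/src/data/benchmarking/compute_metrics.py | get_num_true_detected
-- ===== SOURCE A (Python) =====
-- def get_num_true_detected(true_labels, detected_labels):
--     true_labels = true_labels.copy()
--     true_detected_labels = []
--     for detected_label in detected_labels:
--         if detected_label in true_labels:
--             true_labels.remove(detected_label)
--             true_detected_labels.append(detected_label)
--     return len(true_detected_labels)
-- ===== SOURCE B (Python) =====
-- def get_num_true_detected(true_labels, detected_labels):
--     total = 0
--     seen = set()
--     for label in detected_labels:
--         if label in seen:
--             continue
--         seen.add(label)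
--         total += min(true_labels.count(label), detected_labels.count(label))
--     return total
-- ===== Notes on version B (the rewrite author's own statement) =====
-- stated objective: alternative
-- what changed: Replaces the greedy consuming pass (membership test plus remove on a mutable copy of true_labels) by a sum over distinct detected labels of the minimum of the two multiplicities, tracked with a seen-set; no list is copied or mutated.
import Mathlib
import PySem

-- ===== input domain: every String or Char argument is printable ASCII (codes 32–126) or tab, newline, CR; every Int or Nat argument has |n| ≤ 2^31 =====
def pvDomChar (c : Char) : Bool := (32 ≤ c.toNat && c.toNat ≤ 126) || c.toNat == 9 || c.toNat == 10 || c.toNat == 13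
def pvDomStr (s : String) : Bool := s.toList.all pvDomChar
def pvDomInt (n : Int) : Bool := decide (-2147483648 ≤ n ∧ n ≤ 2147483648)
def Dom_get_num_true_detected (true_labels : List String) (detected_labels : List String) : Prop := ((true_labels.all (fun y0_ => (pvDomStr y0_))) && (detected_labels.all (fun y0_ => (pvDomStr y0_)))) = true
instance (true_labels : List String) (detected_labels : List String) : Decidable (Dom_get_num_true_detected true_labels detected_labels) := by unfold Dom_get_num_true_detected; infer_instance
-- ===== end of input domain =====

-- B replaces A's greedy consuming pass over a mutable copy of true_labels by a sum, over the
-- distinct detected labels (tracked with a seen-set), of the minimum of the two multiplicities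
-- (objective: alternative decomposition; no list is copied or mutated).

-- ===== PORT A =====
-- the loop state is (true_labels copy, true_detected_labels); 'remove' is guarded by the
-- membership test, so remove? is some there and getD returns the erased list
def get_num_true_detected (true_labels : List String) (detected_labels : List String) : Int :=
  ((detected_labels.foldl
    (fun (st : List String × List String) detected_label =>
      if detected_label ∈ st.1 then
        ((PySem.List.remove? st.1 detected_label).getD st.1, st.2 ++ [detected_label])
      else st)
    (true_labels, ([] : List String))).2.length : Int)

-- ===== PORT B =====
def get_num_true_detected_alt (true_labels : List String) (detected_labels : List String) : Int :=
  (detected_labels.foldl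
    (fun (st : PySem.Set String × Int) label =>
      if label ∈ st.1 then st
      else (PySem.Set.add st.1 label,
            st.2 + (min (PySem.List.count true_labels label)
                        (PySem.List.count detected_labels label) : Int)))
    (PySem.Set.empty, 0)).2

-- ===== PRECONDITION & SPEC =====
def Spec_get_num_true_detected (true_labels : List String) (detected_labels : List String) (out : Int) : Prop := out = get_num_true_detected_alt true_labels detected_labels
instance (true_labels : List String) (detected_labels : List String) (out : Int) : Decidable (Spec_get_num_true_detected true_labels detected_labels out) := by unfold Spec_get_num_true_detected; infer_instance

-- ===== CLAIM (what is proved, stated in full; the proofs are below) =====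
def Claim_equal_get_num_true_detected : Prop := ∀ (true_labels : List String) (detected_labels : List String), Dom_get_num_true_detected true_labels detected_labels → Spec_get_num_true_detected true_labels detected_labels (get_num_true_detected true_labels detected_labels)

-- ===== LEMMAS AND PROOFS =====

-- the common yardstick: sum over distinct detected values of the min of the two multiplicities
def pvS (tl ds : List String) : ℕ :=
  ∑ v ∈ ds.toFinset, min (tl.count v) (ds.count v)

lemma pvS_not_mem (tl ds : List String) (d : String) (h : d ∉ tl) :
    pvS tl (d :: ds) = pvS tl ds := by
  have hc : tl.count d = 0 := List.count_eq_zero.mpr h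
  unfold pvS
  rw [List.toFinset_cons]
  by_cases hd : d ∈ ds.toFinset
  · rw [Finset.insert_eq_self.mpr hd]
    refine Finset.sum_congr rfl ?_
    intro v hv
    by_cases hvd : v = d
    · subst hvd; simp [hc]
    · simp [Ne.symm hvd]
  · rw [Finset.sum_insert hd]
    have h0 : min (tl.count d) ((d :: ds).count d) = 0 := by simp [hc]
    rw [h0, zero_add]
    refine Finset.sum_congr rfl ?_
    intro v hv
    have hvd : v ≠ d := by rintro rfl; exact hd hv
    simp [Ne.symm hvd]

lemma pvS_mem (tl ds : List String) (d : String) (h : d ∈ tl) :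
    pvS tl (d :: ds) = 1 + pvS (tl.erase d) ds := by
  have hc : 1 ≤ tl.count d := List.one_le_count_iff.mpr h
  unfold pvS
  rw [List.toFinset_cons]
  by_cases hd : d ∈ ds.toFinset
  · rw [Finset.insert_eq_self.mpr hd]
    have hins : ds.toFinset = insert d (ds.toFinset.erase d) :=
      (Finset.insert_erase hd).symm
    rw [hins, Finset.sum_insert (Finset.notMem_erase _ _),
        Finset.sum_insert (Finset.notMem_erase _ _)]
    have h1 : min (tl.count d) ((d :: ds).count d)
        = 1 + min ((tl.erase d).count d) (ds.count d) := by
      simp only [List.count_cons, List.count_erase, beq_self_eq_true, if_true]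
      omega
    have h2 : ∀ v ∈ ds.toFinset.erase d,
        min (tl.count v) ((d :: ds).count v)
          = min ((tl.erase d).count v) (ds.count v) := by
      intro v hv
      have hvd : v ≠ d := Finset.ne_of_mem_erase hv
      simp [hvd, Ne.symm hvd]
    rw [Finset.sum_congr rfl h2, h1]
    ring
  · rw [Finset.sum_insert hd]
    have hds : ds.count d = 0 := List.count_eq_zero.mpr (by
      intro hmem; exact hd (List.mem_toFinset.mpr hmem))
    have h1 : min (tl.count d) ((d :: ds).count d) = 1 := by
      simp only [List.count_cons, beq_self_eq_true, if_true, hds]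
      omega
    have h2 : ∀ v ∈ ds.toFinset,
        min (tl.count v) ((d :: ds).count v)
          = min ((tl.erase d).count v) (ds.count v) := by
      intro v hv
      have hvd : v ≠ d := by rintro rfl; exact hd hv
      simp [hvd, Ne.symm hvd]
    rw [Finset.sum_congr rfl h2, h1]

-- A's loop computes pvS
lemma pvLoopA (ds : List String) : ∀ (tl acc : List String),
    ((ds.foldl
      (fun (st : List String × List String) d =>
        if d ∈ st.1 then ((PySem.List.remove? st.1 d).getD st.1, st.2 ++ [d]) else st)
      (tl, acc)).2).length = acc.length + pvS tl ds := by
  induction ds with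
  | nil => intro tl acc; simp [pvS]
  | cons d ds ih =>
    intro tl acc
    rw [List.foldl_cons]
    by_cases h : d ∈ tl
    · rw [if_pos h, PySem.List.remove?_eq_some_erase tl d h]
      simp only [Option.getD_some]
      rw [ih (tl.erase d) (acc ++ [d]), pvS_mem tl ds d h]
      simp; omega
    · rw [if_neg h, ih tl acc, pvS_not_mem tl ds d h]

-- B's loop: running total plus the min-multiplicities of the still-unseen distinct labels
lemma pvLoopB (tl dsAll : List String) (l : List String) :
    ∀ (seen : PySem.Set String) (t : Int),
    (l.foldl
      (fun (st : PySem.Set String × Int) label =>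
        if label ∈ st.1 then st
        else (PySem.Set.add st.1 label,
              st.2 + (min (PySem.List.count tl label) (PySem.List.count dsAll label) : Int)))
      (seen, t)).2
    = t + ∑ v ∈ l.toFinset.filter (fun v => v ∉ seen),
            (min (tl.count v) (dsAll.count v) : Int) := by
  induction l with
  | nil => intro seen t; simp
  | cons d l ih =>
    intro seen t
    rw [List.foldl_cons, List.toFinset_cons]
    by_cases h : d ∈ seen
    · rw [if_pos h, ih seen t, Finset.filter_insert]
      simp [h]
    · rw [if_neg h, ih (PySem.Set.add seen d) _]
      have hfilter : (insert d l.toFinset).filter (fun v => v ∉ seen)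
          = insert d (l.toFinset.filter (fun v => v ∉ seen)) := by
        rw [Finset.filter_insert, if_pos h]
      have hkey : l.toFinset.filter (fun v => v ∉ PySem.Set.add seen d)
          = (l.toFinset.filter (fun v => v ∉ seen)).erase d := by
        ext v
        simp only [Finset.mem_filter, Finset.mem_erase, PySem.Set.mem_add]
        tauto
      rw [hfilter, hkey]
      have hins : insert d (l.toFinset.filter (fun v => v ∉ seen))
          = insert d ((l.toFinset.filter (fun v => v ∉ seen)).erase d) := by
        ext v
        simp only [Finset.mem_insert, Finset.mem_erase]
        tauto
      rw [hins, Finset.sum_insert (Finset.notMem_erase _ _)]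
      simp only [PySem.List.count]
      ring

-- ===== VERDICT (by name: the statement is the Claim_ definition above) =====
theorem get_num_true_detected_spec : Claim_equal_get_num_true_detected := by
  intro tl ds _
  unfold Spec_get_num_true_detected get_num_true_detected get_num_true_detected_alt
  rw [pvLoopB tl ds ds PySem.Set.empty 0, pvLoopA ds tl []]
  have hempty : (ds.toFinset.filter (fun v => v ∉ (PySem.Set.empty : PySem.Set String)))
      = ds.toFinset := by
    refine Finset.filter_true_of_mem ?_
    intro v _
    simp [PySem.Set.empty]
  rw [hempty]
  unfold pvS
  push_cast
  simp
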